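-- pv_equiv track=rewrite | github.com/EdwinTh/advent_of_code | AoC_2024/day_02/script02.py | deem_safe_with_dampener
-- ===== SOURCE A (Python) =====
-- def deem_safe(nrs):
--     to_int = [int(nr) for nr in nrs]
--     difs = [to_int[i] - to_int[i-1] for i in range(1, len(to_int))]
--     all_neg = all([d < 0 and d > -4 for d in difs])
--     all_pos = all([d > 0 and d < 4 for d in difs])
--     return all_neg or all_pos
--
-- def deem_safe_with_dampener(nrs):
--     is_safe = deem_safe(nrs)
--     omit = 0
--     while not is_safe and omit < len(nrs):
--         nrs_iter = [n for i,n in enumerate(nrs) if i != omit]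
--         is_safe = deem_safe(nrs_iter)
--         omit += 1
--     return is_safe
-- ===== SOURCE B (Python) =====
-- def _all_ok(xs, lo, hi):
--     return all(lo <= b - a <= hi for a, b in zip(xs, xs[1:]))
--
-- def _first_bad(xs, lo, hi):
--     for i in range(len(xs) - 1):
--         if not (lo <= xs[i + 1] - xs[i] <= hi):
--             return i
--     return None
--
-- def _dir_damp(xs, lo, hi):
--     j = _first_bad(xs, lo, hi)
--     if j is None:
--         return True
--     return _all_ok(xs[:j] + xs[j + 1:], lo, hi) or _all_ok(xs[:j + 1] + xs[j + 2:], lo, hi)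
--
-- def deem_safe_with_dampener(nrs):
--     xs = [int(n) for n in nrs]
--     return _dir_damp(xs, 1, 3) or _dir_damp(xs, -3, -1)
-- ===== Notes on version B (the rewrite author's own statement) =====
-- stated objective: faster
-- what changed: Instead of re-checking every one-element omission (n full scans), B finds the first rule-violating adjacent pair for each direction and only tests removing one of its two endpoints, turning the quadratic dampener into a linear pass.
import Mathlib
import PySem

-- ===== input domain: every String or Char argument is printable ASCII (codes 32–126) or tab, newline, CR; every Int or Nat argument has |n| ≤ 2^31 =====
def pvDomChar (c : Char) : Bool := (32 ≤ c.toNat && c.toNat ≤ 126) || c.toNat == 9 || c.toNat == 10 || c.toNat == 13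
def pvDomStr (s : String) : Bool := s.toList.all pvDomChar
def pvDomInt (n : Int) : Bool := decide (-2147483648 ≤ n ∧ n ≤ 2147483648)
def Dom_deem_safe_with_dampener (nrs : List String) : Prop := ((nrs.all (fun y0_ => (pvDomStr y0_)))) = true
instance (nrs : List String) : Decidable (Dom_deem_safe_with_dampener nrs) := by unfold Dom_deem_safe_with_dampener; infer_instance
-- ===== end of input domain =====

-- B replaces A's quadratic try-every-omission dampener by a linear pass: for each
-- direction it locates the first violating adjacent pair and only tests removing
-- one of its two endpoints (faster).

-- ===== PORT A =====

-- int(nr); Pre_ guarantees the parse succeeds, so getD 0 is never taken on admitted inputs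
def pyToInt (nrs : List String) : List Int :=
  nrs.map (fun nr => (PySem.Int.ofStr? nr).getD 0)

def pyDeemSafe (nrs : List String) : Bool :=
  let to_int := pyToInt nrs
  let difs : List Int := (PySem.List.pyRange 1 to_int.length 1).map
      (fun i => PySem.List.pyGetD to_int i 0 - PySem.List.pyGetD to_int (i-1) 0)
  let all_neg := (difs.map (fun d => decide (d < 0) && decide (d > -4))).all id
  let all_pos := (difs.map (fun d => decide (d > 0) && decide (d < 4))).all id
  all_neg || all_pos

-- [n for i,n in enumerate(nrs) if i != omit]
def pyOmit (nrs : List String) (om : Nat) : List String :=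
  ((PySem.List.enumerate nrs).filter (fun p => p.1 != (om : Int))).map (·.2)

-- the while loop, fueled (fuel = len(nrs) suffices: omit grows by 1 each round)
def loopA (nrs : List String) : Bool → Nat → Nat → Bool
  | s, _, 0 => s
  | s, om, fuel+1 =>
    if !s && om < nrs.length then
      loopA nrs (pyDeemSafe (pyOmit nrs om)) (om + 1) fuel
    else s

def deem_safe_with_dampener (nrs : List String) : Bool :=
  loopA nrs (pyDeemSafe nrs) 0 nrs.length

-- ===== PORT B =====

-- all(lo <= b - a <= hi for a, b in zip(xs, xs[1:]))
def allOkB (lo hi : Int) : List Int → Bool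
  | a :: b :: rest => (decide (lo ≤ b - a) && decide (b - a ≤ hi)) && allOkB lo hi (b :: rest)
  | _ => true

-- first index i with not (lo <= xs[i+1]-xs[i] <= hi)
def firstBadB (lo hi : Int) : List Int → Nat → Option Nat
  | a :: b :: rest, i =>
    if decide (lo ≤ b - a) && decide (b - a ≤ hi) then firstBadB lo hi (b :: rest) (i + 1)
    else some i
  | _, _ => none

def dirDampB (xs : List Int) (lo hi : Int) : Bool :=
  match firstBadB lo hi xs 0 with
  | none => true
  | some j =>
      allOkB lo hi (xs.take j ++ xs.drop (j + 1)) ||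
      allOkB lo hi (xs.take (j + 1) ++ xs.drop (j + 2))

def deem_safe_with_dampener_alt (nrs : List String) : Bool :=
  let xs := nrs.map (fun n => (PySem.Int.ofStr? n).getD 0)
  dirDampB xs 1 3 || dirDampB xs (-3) (-1)

-- ===== PRECONDITION & SPEC =====
-- Pre_: every string parses as a Python int (otherwise int() raises ValueError in A and in B)
def Pre_deem_safe_with_dampener (nrs : List String) : Prop :=
  (nrs.all (fun s => (PySem.Int.ofStr? s).isSome)) = true
instance (nrs : List String) : Decidable (Pre_deem_safe_with_dampener nrs) := by
  unfold Pre_deem_safe_with_dampener; infer_instance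

def pvWitness_deem_safe_with_dampener : List String := ["7", "6", "4", "2", "1"]

def Spec_deem_safe_with_dampener (nrs : List String) (out : Bool) : Prop := out = deem_safe_with_dampener_alt nrs
instance (nrs : List String) (out : Bool) : Decidable (Spec_deem_safe_with_dampener nrs out) := by unfold Spec_deem_safe_with_dampener; infer_instance

-- ===== CLAIM (what is proved, stated in full; the proofs are below) =====
def Claim_equal_deem_safe_with_dampener : Prop := ∀ (nrs : List String), Dom_deem_safe_with_dampener nrs → Pre_deem_safe_with_dampener nrs → Spec_deem_safe_with_dampener nrs (deem_safe_with_dampener nrs)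

-- ===== LEMMAS AND PROOFS =====

-- pointwise characterisation of allOkB
theorem allOkB_iff (lo hi : Int) (xs : List Int) :
    allOkB lo hi xs = true ↔
      ∀ i, (h : i + 1 < xs.length) → lo ≤ xs[i+1] - xs[i] ∧ xs[i+1] - xs[i] ≤ hi := by
  fun_induction allOkB lo hi xs with
  | case1 a b rest ih =>
      simp only [Bool.and_eq_true, decide_eq_true_eq, ih]
      constructor
      · rintro ⟨⟨h1, h2⟩, h3⟩ i hi
        cases i with
        | zero => refine ⟨by simpa using h1, by simpa using h2⟩
        | succ n => exact h3 n (by simpa using hi)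
      · intro h
        refine ⟨by simpa using h 0 (by simp), fun i hi => ?_⟩
        exact h (i+1) (by simpa using hi)
  | case2 xs h1 =>
      match xs with
      | [] => simp
      | [a] => simp
      | a :: b :: rest => exact absurd rfl (h1 a b rest)

-- firstBadB finds nothing iff every pair is ok
theorem firstBadB_none_iff (lo hi : Int) (xs : List Int) (i : Nat) :
    firstBadB lo hi xs i = none ↔ allOkB lo hi xs = true := by
  induction xs generalizing i with
  | nil => simp [firstBadB, allOkB]
  | cons a tl ih =>
      match tl with
      | [] => simp [firstBadB, allOkB]
      | b :: rest =>
          by_cases h : lo ≤ b - a ∧ b ≤ hi + a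
          · simp [firstBadB, allOkB, h, ih]
          · simp [firstBadB, allOkB, h]

-- firstBadB returns a genuine violating pair
theorem firstBadB_some (lo hi : Int) (xs : List Int) (i j : Nat)
    (h : firstBadB lo hi xs i = some j) :
    ∃ k, j = i + k ∧ ∃ (hk : k + 1 < xs.length),
      ¬ (lo ≤ xs[k+1] - xs[k] ∧ xs[k+1] - xs[k] ≤ hi) := by
  induction xs generalizing i with
  | nil => simp [firstBadB] at h
  | cons a tl ih =>
      match tl with
      | [] => simp [firstBadB] at h
      | b :: rest =>
          by_cases hc : (decide (lo ≤ b - a) && decide (b - a ≤ hi)) = true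
          · rw [firstBadB, if_pos hc] at h
            obtain ⟨k, hk1, hk2, hk3⟩ := ih (i+1) h
            exact ⟨k + 1, by omega, by simpa using hk2, by simpa using hk3⟩
          · rw [firstBadB, if_neg hc] at h
            injection h with h'
            subst h'
            refine ⟨0, by omega, by simp, ?_⟩
            simp only [Bool.and_eq_true, decide_eq_true_eq, not_and] at hc ⊢
            intro h1 h2
            exact hc (by simpa using h1) (by simpa using h2)

-- a single violating pair forces allOkB to be false
theorem allOkB_false_of_bad (lo hi : Int) (ys : List Int) (i : Nat) (h : i + 1 < ys.length)
    (hbad : ¬ (lo ≤ ys[i+1] - ys[i] ∧ ys[i+1] - ys[i] ≤ hi)) :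
    allOkB lo hi ys = false := by
  cases h' : allOkB lo hi ys with
  | false => rfl
  | true => exact absurd (((allOkB_iff lo hi ys).mp h') i h) hbad

-- removing any element other than an endpoint of a violating pair keeps it violating
theorem allOkB_eraseIdx_false (lo hi : Int) (xs : List Int) (j k : Nat)
    (hj : j + 1 < xs.length)
    (hbad : ¬ (lo ≤ xs[j+1] - xs[j] ∧ xs[j+1] - xs[j] ≤ hi))
    (hkn : k < xs.length)
    (hk : k ≠ j ∧ k ≠ j + 1) :
    allOkB lo hi (xs.eraseIdx k) = false := by
  have hlen : (xs.eraseIdx k).length = xs.length - 1 := by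
    rw [List.length_eraseIdx, if_pos hkn]
  rcases Nat.lt_or_ge k j with hkj | hkj
  · obtain ⟨j', rfl⟩ : ∃ j', j = j' + 1 := ⟨j - 1, by omega⟩
    apply allOkB_false_of_bad lo hi _ j' (by omega)
    simp only [List.getElem_eraseIdx]
    rw [dif_neg (by omega), dif_neg (by omega)]
    exact hbad
  · have hkj' : j + 1 < k := by omega
    apply allOkB_false_of_bad lo hi _ j (by omega)
    simp only [List.getElem_eraseIdx]
    rw [dif_pos (by omega), dif_pos (by omega)]
    exact hbad

-- B's direction check equals "safe, or some single removal makes it safe"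
theorem dirDampB_eq (xs : List Int) (lo hi : Int) :
    dirDampB xs lo hi =
      (allOkB lo hi xs || (List.range xs.length).any (fun k => allOkB lo hi (xs.eraseIdx k))) := by
  cases h : firstBadB lo hi xs 0 with
  | none =>
      have hall := (firstBadB_none_iff lo hi xs 0).mp h
      simp [dirDampB, h, hall]
  | some j =>
      obtain ⟨k, hk0, hk1, hbad⟩ := firstBadB_some lo hi xs 0 j h
      obtain rfl : j = k := by omega
      have hfalse : allOkB lo hi xs = false := allOkB_false_of_bad lo hi xs j hk1 hbad
      have e1 : xs.take j ++ xs.drop (j + 1) = xs.eraseIdx j :=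
        (List.eraseIdx_eq_take_drop_succ xs j).symm
      have e2 : xs.take (j + 1) ++ xs.drop (j + 2) = xs.eraseIdx (j + 1) := by
        rw [List.eraseIdx_eq_take_drop_succ]
      simp only [dirDampB, h, e1, e2, hfalse, Bool.false_or]
      rw [Bool.eq_iff_iff]
      simp only [List.any_eq_true, List.mem_range, Bool.or_eq_true]
      constructor
      · rintro (h1 | h1)
        · exact ⟨j, by omega, h1⟩
        · exact ⟨j + 1, by omega, h1⟩
      · rintro ⟨m, hm, hOk⟩
        by_cases em1 : m = j
        · subst em1; exact Or.inl hOk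
        · by_cases em2 : m = j + 1
          · subst em2; exact Or.inr hOk
          · rw [allOkB_eraseIdx_false lo hi xs j m hk1 hbad hm ⟨em1, em2⟩] at hOk
            exact absurd hOk (by simp)

-- A's deem_safe in terms of allOkB
-- A's comprehension over difs, characterised as allOkB
theorem pyDifs_all_eq (ti : List Int) (p : Int → Bool) (lo hi : Int)
    (hp : ∀ d, p d = true ↔ (lo ≤ d ∧ d ≤ hi)) :
    ((((PySem.List.pyRange 1 (ti.length : Int) 1).map
        (fun i => PySem.List.pyGetD ti i 0 - PySem.List.pyGetD ti (i-1) 0)).map p).all id)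
      = allOkB lo hi ti := by
  rw [Bool.eq_iff_iff, allOkB_iff]
  simp only [List.all_eq_true, List.map_map, List.mem_map, Function.comp,
    PySem.List.mem_pyRange_one, id]
  constructor
  · rintro hA k hk
    have h := hA (p (PySem.List.pyGetD ti ((k+1 : Nat) : Int) 0 -
        PySem.List.pyGetD ti (((k+1 : Nat) : Int) - 1) 0))
        ⟨((k+1 : Nat) : Int), ⟨by push_cast; omega, by push_cast; omega⟩, rfl⟩
    rw [PySem.List.pyGetD_eq_getElem ti 0 (by omega) (by push_cast; omega),
        PySem.List.pyGetD_eq_getElem ti 0 (by push_cast; omega) (by push_cast; omega), hp] at h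
    have e1 : ((k+1 : Nat) : Int).toNat = k + 1 := by omega
    have e2 : (((k+1 : Nat) : Int) - 1).toNat = k := by omega
    simp only [e1, e2] at h
    exact h
  · rintro hA x ⟨i, ⟨hi1, hi2⟩, rfl⟩
    rw [PySem.List.pyGetD_eq_getElem ti 0 (by omega) (by omega),
        PySem.List.pyGetD_eq_getElem ti 0 (by omega) (by omega), hp]
    have hk : (i - 1).toNat + 1 < ti.length := by omega
    have e1 : i.toNat = (i - 1).toNat + 1 := by omega
    simp only [e1]
    exact hA (i - 1).toNat hk

theorem pyDeemSafe_eq (nrs : List String) :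
    pyDeemSafe nrs = (allOkB (-3) (-1) (pyToInt nrs) || allOkB 1 3 (pyToInt nrs)) := by
  simp only [pyDeemSafe]
  rw [pyDifs_all_eq (pyToInt nrs) _ (-3) (-1) (by intro d; simp; omega),
      pyDifs_all_eq (pyToInt nrs) _ 1 3 (by intro d; simp; omega)]

-- the enumerate/filter comprehension is eraseIdx
-- enumerate/filter at any starting index
theorem omitAux_eq (nrs : List String) (s t : Int) (hst : s ≤ t) :
    ((PySem.List.enumerate nrs s).filter (fun p => p.1 != t)).map (·.2)
      = nrs.eraseIdx (t - s).toNat := by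
  induction nrs generalizing s with
  | nil => simp [PySem.List.enumerate_nil]
  | cons x xs ih =>
      rw [PySem.List.enumerate_cons]
      by_cases h : s = t
      · subst h
        rw [List.filter_cons_of_neg (by simp)]
        have hall : ∀ p ∈ PySem.List.enumerate xs (s+1), (p.1 != s) = true := by
          intro p hp
          obtain ⟨k, hk, rfl⟩ := (PySem.List.mem_enumerate_iff xs (s+1) p).mp hp
          simp; omega
        rw [List.filter_eq_self.mpr hall, PySem.List.map_snd_enumerate]
        have : (s - s).toNat = 0 := by omega
        rw [this, List.eraseIdx_cons_zero]
      · rw [List.filter_cons_of_pos (by simp; omega)]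
        rw [List.map_cons, ih (s+1) (by omega)]
        have : (t - s).toNat = (t - (s+1)).toNat + 1 := by omega
        rw [this, List.eraseIdx_cons_succ]

theorem pyOmit_eq (nrs : List String) (k : Nat) : pyOmit nrs k = nrs.eraseIdx k := by
  unfold pyOmit
  rw [omitAux_eq nrs 0 k (by omega)]
  congr 1

-- the while loop is an existential over the remaining omissions
theorem loopA_eq (nrs : List String) (fuel om : Nat) (s : Bool)
    (hfuel : om + fuel = nrs.length) :
    loopA nrs s om fuel =
      (s || (List.range' om fuel).any (fun k => pyDeemSafe (pyOmit nrs k))) := by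
  induction fuel generalizing om s with
  | zero => simp [loopA]
  | succ n ih =>
      have hom : om < nrs.length := by omega
      rw [loopA]
      cases s with
      | true => simp [hom]
      | false =>
          rw [if_pos (by simp [hom])]
          rw [ih (om + 1) _ (by omega)]
          rw [List.range'_succ, List.any_cons]
          simp

theorem any_or_distrib {α : Type} (l : List α) (f g : α → Bool) :
    l.any (fun x => f x || g x) = (l.any f || l.any g) := by
  induction l with
  | nil => rfl
  | cons x xs ih =>
      simp only [List.any_cons, ih]
      cases f x <;> cases g x <;> cases xs.any f <;> cases xs.any g <;> rfl

-- ===== VERDICT (by name: the statement is the Claim_ definition above) =====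
theorem deem_safe_with_dampener_spec : Claim_equal_deem_safe_with_dampener := by
  intro nrs _ _
  unfold Spec_deem_safe_with_dampener deem_safe_with_dampener
  rw [loopA_eq nrs nrs.length 0 _ (by omega), ← List.range_eq_range']
  have hfun : ∀ k : Nat, pyDeemSafe (pyOmit nrs k) =
      (allOkB (-3) (-1) ((pyToInt nrs).eraseIdx k) || allOkB 1 3 ((pyToInt nrs).eraseIdx k)) := by
    intro k
    rw [pyOmit_eq, pyDeemSafe_eq]
    unfold pyToInt
    rw [List.eraseIdx_map]
  rw [pyDeemSafe_eq]
  simp only [hfun]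
  rw [any_or_distrib]
  simp only [deem_safe_with_dampener_alt]
  rw [dirDampB_eq, dirDampB_eq]
  have hlen : (nrs.map (fun n => (PySem.Int.ofStr? n).getD 0)).length = nrs.length := by
    simp
  have hti : pyToInt nrs = nrs.map (fun n => (PySem.Int.ofStr? n).getD 0) := rfl
  rw [hlen, ← hti]
  cases allOkB (-3) (-1) (pyToInt nrs) <;> cases allOkB 1 3 (pyToInt nrs) <;>
    cases (List.range nrs.length).any (fun k => allOkB (-3) (-1) ((pyToInt nrs).eraseIdx k)) <;>
    cases (List.range nrs.length).any (fun k => allOkB 1 3 ((pyToInt nrs).eraseIdx k)) <;>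
    simp
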